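-- pv_equiv track=rewrite | github.com/IlariaCattaneo/Algorithms-Data-Structures | Algo_exercises/Exercise_class_sessions/tests_session_4.py | check_partition_even_odd
-- ===== SOURCE A (Python) =====
-- def check_partition_even_odd( A ):
--     even = True
--     for i in range(len(A)):
--         if A[i] % 2 == 0:
--             if not even:
--                 return False
--         else:
--             even = False
--     return True
-- ===== SOURCE B (Python) =====
-- def check_partition_even_odd(A):
--     return A == sorted(A, key=lambda x: x % 2)
-- ===== Notes on version B (the rewrite author's own statement) =====
-- stated objective: idiomatic
-- what changed: Replaces the flag-carrying scan with a stable sort by parity key and an equality comparison: A is an evens-then-odds partition iff sorting by x % 2 leaves it unchanged.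
import Mathlib
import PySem

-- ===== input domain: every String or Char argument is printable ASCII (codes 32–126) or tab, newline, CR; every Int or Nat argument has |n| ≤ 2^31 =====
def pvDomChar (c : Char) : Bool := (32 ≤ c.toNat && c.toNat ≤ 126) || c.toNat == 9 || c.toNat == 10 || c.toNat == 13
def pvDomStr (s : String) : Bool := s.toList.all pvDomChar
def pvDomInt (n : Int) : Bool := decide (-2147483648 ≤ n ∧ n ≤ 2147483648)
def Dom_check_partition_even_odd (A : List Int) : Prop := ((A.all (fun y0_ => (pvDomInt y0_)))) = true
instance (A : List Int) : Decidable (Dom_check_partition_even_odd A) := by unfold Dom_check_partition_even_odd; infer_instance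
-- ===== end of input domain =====

-- B replaces A's flag-carrying scan by a stable parity-key sort compared with A (idiomatic; not faster).

-- ===== PORT A =====
-- A's index loop with the early 'return False' and the mutable flag 'even',
-- as the obvious structural recursion over the list carrying the same flag.
def check_partition_even_odd_go (xs : List Int) (even : Bool) : Bool :=
  match xs with
  | [] => true
  | x :: rest =>
      if PySem.Int.mod x 2 = 0 then
        if !even then false else check_partition_even_odd_go rest even
      else
        check_partition_even_odd_go rest false

def check_partition_even_odd (A : List Int) : Bool :=
  check_partition_even_odd_go A true

-- ===== PORT B =====
-- Source B: return A == sorted(A, key=lambda x: x % 2)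
def check_partition_even_odd_alt (A : List Int) : Bool :=
  A == PySem.List.sorted A (fun x => PySem.Int.mod x 2)

-- ===== PRECONDITION & SPEC =====
def Spec_check_partition_even_odd (A : List Int) (out : Bool) : Prop := out = check_partition_even_odd_alt A
instance (A : List Int) (out : Bool) : Decidable (Spec_check_partition_even_odd A out) := by unfold Spec_check_partition_even_odd; infer_instance

-- ===== CLAIM (what is proved, stated in full; the proofs are below) =====
def Claim_equal_check_partition_even_odd : Prop := ∀ (A : List Int), Dom_check_partition_even_odd A → Spec_check_partition_even_odd A (check_partition_even_odd A)

-- ===== LEMMAS AND PROOFS =====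

theorem pv_mod_eq (a : Int) : PySem.Int.mod a 2 = a % 2 :=
  PySem.Int.mod_eq_emod_of_pos (by norm_num)

-- with the flag already false, A's loop checks that every remaining element is odd
theorem go_false_iff (xs : List Int) :
    check_partition_even_odd_go xs false = true ↔ ∀ y ∈ xs, y % 2 = 1 := by
  induction xs with
  | nil => simp [check_partition_even_odd_go]
  | cons x rest ih =>
      rw [check_partition_even_odd_go]
      by_cases hx : PySem.Int.mod x 2 = 0
      · rw [if_pos hx, if_pos (by simp)]
        rw [pv_mod_eq] at hx
        constructor
        · intro h; exact absurd h (by simp)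
        · intro h; have := h x (List.mem_cons_self); omega
      · rw [if_neg hx, ih]
        rw [pv_mod_eq] at hx
        have hx1 : x % 2 = 1 := by omega
        constructor
        · intro h y hy
          rcases List.mem_cons.mp hy with rfl | hy'
          · exact hx1
          · exact h y hy'
        · intro h y hy; exact h y (List.mem_cons_of_mem x hy)

-- A's loop accepts exactly the lists whose parity keys are nondecreasing
theorem go_true_iff (xs : List Int) :
    check_partition_even_odd_go xs true = true ↔
      xs.Pairwise (fun a b => PySem.Int.mod a 2 ≤ PySem.Int.mod b 2) := by
  induction xs with
  | nil => simp [check_partition_even_odd_go]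
  | cons x rest ih =>
      rw [check_partition_even_odd_go, List.pairwise_cons]
      by_cases hx : PySem.Int.mod x 2 = 0
      · rw [if_pos hx, if_neg (by simp), ih]
        constructor
        · intro h
          refine ⟨fun y _ => ?_, h⟩
          rw [hx, pv_mod_eq]; omega
        · exact And.right
      · rw [if_neg hx, go_false_iff]
        rw [pv_mod_eq] at hx
        have hx1 : x % 2 = 1 := by omega
        constructor
        · intro h
          refine ⟨fun y hy => by rw [pv_mod_eq, pv_mod_eq, hx1, h y hy], ?_⟩
          exact List.Pairwise.imp_of_mem
            (fun {a b} ha hb _ => by rw [pv_mod_eq, pv_mod_eq, h a ha, h b hb])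
            (List.pairwise_of_forall_mem_list (fun _ _ _ _ => trivial))
        · rintro ⟨hhead, _⟩ y hy
          have := hhead y hy
          rw [pv_mod_eq, pv_mod_eq, hx1] at this
          omega

theorem sorted_eq_self_iff (A : List Int) :
    PySem.List.sorted A (fun x => PySem.Int.mod x 2) = A ↔
      A.Pairwise (fun a b => PySem.Int.mod a 2 ≤ PySem.Int.mod b 2) := by
  constructor
  · intro h
    have := PySem.List.sorted_pairwise A (fun x => PySem.Int.mod x 2)
    rwa [h] at this
  · exact PySem.List.sorted_eq_self_of_pairwise A (fun x => PySem.Int.mod x 2)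

-- ===== VERDICT (by name: the statement is the Claim_ definition above) =====
theorem check_partition_even_odd_spec : Claim_equal_check_partition_even_odd := by
  intro A _
  unfold Spec_check_partition_even_odd check_partition_even_odd check_partition_even_odd_alt
  rw [Bool.eq_iff_iff, beq_iff_eq, go_true_iff, eq_comm, sorted_eq_self_iff]
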